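-- pv_equiv track=rewrite | github.com/chakraa1/Data-Structures-and-Algorithms | Arrays/Subarrays/AlternatingSubarraysEasy.py | AlternatingSubarraysEasyOptimised
-- ===== SOURCE A (Python) =====
-- def AlternatingSubarraysEasyOptimised(A,B):
--     alternating_subarray_indices = []
--     subrray_length = 2 * B + 1
--     n = len(A)
--
--     if subrray_length == 1:
--         for i in range(n):
--             alternating_subarray_indices.append(i)
--         return alternating_subarray_indices
--
--     for start in range(n - subrray_length + 1):
--         end = subrray_length + start - 1
--         subarray = A[start:end + 1]
--         isAlt = True
--         previous_element = subarray[0]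
--         for i in range(1, len(subarray)):
--             if previous_element == subarray[i]:
--                 isAlt = False
--             previous_element = subarray[i]
--         if isAlt:
--             alternating_subarray_indices.append((start + end) // 2)
--
--     return alternating_subarray_indices
-- ===== SOURCE B (Python) =====
-- def AlternatingSubarraysEasyOptimised(A, B):
--     n = len(A)
--     L = 2 * B + 1
--     if L == 1:
--         return list(range(n))
--     if n < L:
--         return []
--     # flags[j] == True iff the adjacent pair (A[j], A[j+1]) is equal
--     flags = [x == y for x, y in zip(A, A[1:])]
--     c = n - L + 1                # number of windows
--     cnt = sum(flags[:L - 1])     # equal pairs inside the first window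
--     res = []
--     for s in range(c):
--         if cnt == 0:
--             res.append(s + B)    # centre of window [s, s+L-1]
--         if s + 1 < c:
--             cnt += flags[s + L - 1] - flags[s]
--     return res
-- ===== Notes on version B (the rewrite author's own statement) =====
-- stated objective: alternative
-- what changed: Replaces A's per-window rescan (materialising each length-2B+1 slice and walking it) by a one-pass sliding window: adjacent-equal flags are computed once and each window's equal-pair count is updated in O(1), so the per-window inner loop disappears and the centre index is start+B instead of (start+end)//2.
import Mathlib
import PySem

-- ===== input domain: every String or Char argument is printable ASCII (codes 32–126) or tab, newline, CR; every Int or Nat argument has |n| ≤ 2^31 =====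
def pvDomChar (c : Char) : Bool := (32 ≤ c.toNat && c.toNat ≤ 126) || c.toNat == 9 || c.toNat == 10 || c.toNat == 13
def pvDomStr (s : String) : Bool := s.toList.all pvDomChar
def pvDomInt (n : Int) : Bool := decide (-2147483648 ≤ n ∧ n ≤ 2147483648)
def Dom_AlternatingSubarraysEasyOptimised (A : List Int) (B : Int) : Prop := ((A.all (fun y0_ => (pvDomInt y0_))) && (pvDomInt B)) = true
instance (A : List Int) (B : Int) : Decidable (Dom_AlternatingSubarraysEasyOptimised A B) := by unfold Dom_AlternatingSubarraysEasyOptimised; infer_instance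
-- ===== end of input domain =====

-- B replaces A's per-window rescan by adjacent-equal flags and a sliding-window count updated in O(1) per start; objective: alternative.


-- ===== PORT A =====
def AlternatingSubarraysEasyOptimised (A : List Int) (B : Int) : List Int :=
  let subrrayLength : Int := 2 * B + 1
  let n : Int := (A.length : Int)
  if subrrayLength = 1 then
    PySem.List.pyRange 0 n 1
  else
    (PySem.List.pyRange 0 (n - subrrayLength + 1) 1).foldl (fun acc start =>
      let eend : Int := subrrayLength + start - 1
      let subarray := PySem.List.slice A (some start) (some (eend + 1))
      -- subarray[0]: pyGetD is exact under Pre_ (0 ≤ B): the window is then nonempty;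
      -- Python raises IndexError exactly where it would be empty (B < 0), excluded by Pre_.
      let st := (PySem.List.pyRange 1 (subarray.length : Int) 1).foldl
        (fun (st : Bool × Int) i =>
          ((if st.2 = PySem.List.pyGetD subarray i 0 then false else st.1),
           PySem.List.pyGetD subarray i 0))
        (true, PySem.List.pyGetD subarray 0 0)
      if st.1 then acc ++ [PySem.Int.floordiv (start + eend) 2] else acc) []

-- ===== PORT B =====
def AlternatingSubarraysEasyOptimised_alt (A : List Int) (B : Int) : List Int :=
  let n : Int := (A.length : Int)
  let L : Int := 2 * B + 1
  if L = 1 then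
    PySem.List.pyRange 0 n 1
  else if n < L then
    []
  else
    -- flags[j] = (A[j] == A[j+1]); zip(A, A[1:])
    let flags := (A.zip (PySem.List.slice A (some 1) none)).map (fun p => p.1 == p.2)
    -- cnt = sum(flags[:L-1]): a Python sum of bools is the number of True entries
    let cnt : Int := (((PySem.List.slice flags none (some (L - 1))).countP (fun f => f) : Nat) : Int)
    let res : List Int := if cnt = 0 then [B] else []
    -- for s, (fo, fi) in enumerate(zip(flags, flags[L-1:]), 1): cnt += fi - fo; if cnt == 0: append(s + B)
    ((PySem.List.enumerate (flags.zip (PySem.List.slice flags (some (L - 1)) none)) 1).foldl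
      (fun (st : Int × List Int) e =>
        let cnt' := st.1 + ((if e.2.2 then 1 else 0) - (if e.2.1 then 1 else 0))
        (cnt', if cnt' = 0 then st.2 ++ [e.1 + B] else st.2))
      (cnt, res)).2

-- ===== PRECONDITION & SPEC =====
-- Pre_ excludes exactly B < 0, where Python A raises IndexError (the negative-length window slice is empty and subarray[0] fails).
def Pre_AlternatingSubarraysEasyOptimised (A : List Int) (B : Int) : Prop := 0 ≤ B
instance (A : List Int) (B : Int) : Decidable (Pre_AlternatingSubarraysEasyOptimised A B) := by unfold Pre_AlternatingSubarraysEasyOptimised; infer_instance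
def pvWitness_AlternatingSubarraysEasyOptimised : List Int × Int := ([1, 2, 1, 1, 2], 1)

def Spec_AlternatingSubarraysEasyOptimised (A : List Int) (B : Int) (out : List Int) : Prop := out = AlternatingSubarraysEasyOptimised_alt A B
instance (A : List Int) (B : Int) (out : List Int) : Decidable (Spec_AlternatingSubarraysEasyOptimised A B out) := by unfold Spec_AlternatingSubarraysEasyOptimised; infer_instance

-- ===== CLAIM (what is proved, stated in full; the proofs are below) =====
def Claim_equal_AlternatingSubarraysEasyOptimised : Prop := ∀ (A : List Int) (B : Int), Dom_AlternatingSubarraysEasyOptimised A B → Pre_AlternatingSubarraysEasyOptimised A B → Spec_AlternatingSubarraysEasyOptimised A B (AlternatingSubarraysEasyOptimised A B)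

-- ===== LEMMAS AND PROOFS =====

-- number of adjacent equal pairs in a list
def pvCntAdj : List Int → Int
  | x :: y :: ys => (if x = y then 1 else 0) + pvCntAdj (y :: ys)
  | _ => 0

-- no adjacent equal pair
def pvNoAdj : List Int → Bool
  | x :: y :: ys => (!(x == y)) && pvNoAdj (y :: ys)
  | _ => true

-- the adjacent-equal flags of B and the count inside the window starting at s
def pvFlags (A : List Int) : List Bool := (A.zip A.tail).map (fun p => p.1 == p.2)
def pvD (A : List Int) (l s : Nat) : Int := pvCntAdj ((A.drop s).take l)

theorem pvCntAdj_nonneg : ∀ (xs : List Int), 0 ≤ pvCntAdj xs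
  | [] => by simp [pvCntAdj]
  | [_] => by simp [pvCntAdj]
  | x :: y :: ys => by
      have := pvCntAdj_nonneg (y :: ys)
      simp only [pvCntAdj]
      split <;> omega

theorem pvCntAdj_eq_zero_iff : ∀ (xs : List Int), pvCntAdj xs = 0 ↔ pvNoAdj xs = true
  | [] => by simp [pvCntAdj, pvNoAdj]
  | [_] => by simp [pvCntAdj, pvNoAdj]
  | x :: y :: ys => by
      have h1 := pvCntAdj_eq_zero_iff (y :: ys)
      have h2 := pvCntAdj_nonneg (y :: ys)
      by_cases hxy : x = y
      · simp [pvCntAdj, pvNoAdj, hxy]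
        omega
      · simp [pvCntAdj, pvNoAdj, hxy, h1]

theorem pvCntAdj_split : ∀ (xs : List Int) (k : Nat),
    pvCntAdj (xs.take (k + 1)) + pvCntAdj (xs.drop k) = pvCntAdj xs
  | [], k => by simp [pvCntAdj]
  | x :: ys, 0 => by simp [pvCntAdj]
  | [x], k + 1 => by simp [pvCntAdj]
  | x :: y :: zs, k + 1 => by
      have ih := pvCntAdj_split (y :: zs) k
      cases k with
      | zero => simp [pvCntAdj]
      | succ k' =>
        simp only [List.take_succ_cons, List.drop_succ_cons, pvCntAdj] at ih ⊢
        split <;> omega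

-- the inner flag loop of A computes pvNoAdj of (p :: ys)
theorem pvFoldAlt : ∀ (ys : List Int) (b : Bool) (p : Int),
    (ys.foldl (fun (st : Bool × Int) (cur : Int) =>
        ((if st.2 = cur then false else st.1), cur)) (b, p)).1
      = (b && pvNoAdj (p :: ys))
  | [], b, p => by simp [pvNoAdj]
  | cur :: ys, b, p => by
      have := pvFoldAlt ys (if p = cur then false else b) cur
      simp only [List.foldl_cons, this, pvNoAdj]
      by_cases h : p = cur
      · simp [h]
      · have hb : (p == cur) = false := beq_eq_false_iff_ne.2 h
        simp [h, hb]

-- step: adding element m+1 adds the flag for the pair (m, m+1)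
theorem pvCntAdj_take_succ (A : List Int) (m : Nat) (h : m + 1 < A.length) :
    pvCntAdj (A.take (m + 2)) =
      pvCntAdj (A.take (m + 1)) + (if A.getD m 0 = A.getD (m + 1) 0 then 1 else 0) := by
  have hs := pvCntAdj_split (A.take (m + 2)) m
  have h1 : (A.take (m + 2)).take (m + 1) = A.take (m + 1) := by
    rw [List.take_take]; congr 1; omega
  have h2 : (A.take (m + 2)).drop m = [A[m], A[m + 1]] := by
    rw [List.drop_take]
    have e : m + 2 - m = 2 := by omega
    have e1 : List.drop m A = A[m] :: List.drop (m + 1) A := List.drop_eq_getElem_cons (by omega)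
    have e2 : List.drop (m + 1) A = A[m + 1] :: List.drop (m + 2) A := List.drop_eq_getElem_cons (by omega)
    rw [e, e1, e2]
    rfl
  rw [h1, h2] at hs
  have hg1 : A.getD m 0 = A[m] := List.getD_eq_getElem _ _ (by omega)
  have hg2 : A.getD (m + 1) 0 = A[m + 1] := List.getD_eq_getElem _ _ (by omega)
  rw [hg1, hg2]
  simp only [pvCntAdj] at hs
  omega

theorem pvFlags_length (A : List Int) : (pvFlags A).length = A.length - 1 := by
  simp [pvFlags, List.length_tail]

theorem pvFlags_getD (A : List Int) (j : Nat) (h : j + 1 < A.length) :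
    (pvFlags A).getD j false = (A.getD j 0 == A.getD (j + 1) 0) := by
  have hj : j < (pvFlags A).length := by rw [pvFlags_length]; omega
  rw [List.getD_eq_getElem _ _ hj]
  simp only [pvFlags, List.getElem_map, List.getElem_zip]
  rw [List.getElem_tail]
  rw [List.getD_eq_getElem _ _ (by omega : j < A.length),
      List.getD_eq_getElem _ _ (by omega : j + 1 < A.length)]

-- the window count is the difference of two prefix counts
theorem pvWindowSplit (A : List Int) (s l : Nat) (hl : 1 ≤ l) (hsl : s + l ≤ A.length) :
    pvCntAdj (A.take (s + l)) = pvCntAdj (A.take (s + 1)) + pvD A l s := by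
  have hs := pvCntAdj_split (A.take (s + l)) s
  have h1 : (A.take (s + l)).take (s + 1) = A.take (s + 1) := by
    rw [List.take_take]; congr 1; omega
  have h2 : (A.take (s + l)).drop s = (A.drop s).take l := by
    rw [List.drop_take]; congr 1; omega
  rw [h1, h2] at hs
  unfold pvD
  omega

theorem pvCntAdj_take_one (A : List Int) : pvCntAdj (A.take 1) = 0 := by
  cases A <;> simp [pvCntAdj]

-- sliding the window one step to the right
theorem pvD_succ (A : List Int) (b s : Nat) (h : s + 1 + (2 * b + 1) ≤ A.length) :
    pvD A (2 * b + 1) (s + 1) = pvD A (2 * b + 1) s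
      + (if A.getD (s + 2 * b) 0 = A.getD (s + 2 * b + 1) 0 then 1 else 0)
      - (if A.getD s 0 = A.getD (s + 1) 0 then 1 else 0) := by
  have e1 := pvWindowSplit A s (2 * b + 1) (by omega) (by omega)
  have e2 := pvWindowSplit A (s + 1) (2 * b + 1) (by omega) (by omega)
  have e3 := pvCntAdj_take_succ A (s + 2 * b) (by omega)
  have e4 := pvCntAdj_take_succ A s (by omega)
  have r1 : s + 1 + (2 * b + 1) = s + 2 * b + 2 := by omega
  have r2 : s + (2 * b + 1) = s + 2 * b + 1 := by omega
  rw [r1] at e2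
  rw [r2] at e1
  have r3 : s + 1 + 1 = s + 2 := by omega
  rw [r3] at e2
  omega

-- sum(flags[:m]) counts the adjacent-equal pairs among A[0..m]
theorem pvCount_take (A : List Int) : ∀ (m : Nat), m + 1 ≤ A.length →
    ((((pvFlags A).take m).countP (fun f => f) : Nat) : Int) = pvCntAdj (A.take (m + 1))
  | 0, _ => by simp [pvCntAdj_take_one]
  | m + 1, h => by
      have ih := pvCount_take A m (by omega)
      have hm : m < (pvFlags A).length := by rw [pvFlags_length]; omega
      rw [List.take_succ, List.getElem?_eq_getElem hm]
      simp only [Option.toList_some, List.countP_append, List.countP_singleton]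
      have hf : (pvFlags A).getD m false = (A.getD m 0 == A.getD (m + 1) 0) := pvFlags_getD A m (by omega)
      rw [List.getD_eq_getElem _ _ hm] at hf
      rw [pvCntAdj_take_succ A m (by omega)]
      rw [hf]
      by_cases hx : A.getD m 0 = A.getD (m + 1) 0
      · have hbx : (A.getD m 0 == A.getD (m + 1) 0) = true := beq_iff_eq.2 hx
        simp [hbx, hx]; push_cast [ih]; ring
      · have hbx : (A.getD m 0 == A.getD (m + 1) 0) = false := beq_eq_false_iff_ne.2 hx
        simp [hbx, hx]; push_cast [ih]; ring

theorem pvNoAdj_iff_pvD (A : List Int) (l s : Nat) :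
    (pvNoAdj ((A.drop s).take l) = true) ↔ pvD A l s = 0 :=
  (pvCntAdj_eq_zero_iff _).symm

-- B's sliding-window loop appends exactly the centres of the valid windows
theorem pvFoldB (A : List Int) (B : Int) (b : Nat) (hlen : 2 * b + 1 ≤ A.length) :
    ∀ (ts : List (Bool × Bool)) (t : Nat) (res : List Int),
    t + 1 + ts.length = A.length - (2 * b + 1) + 1 →
    (∀ k (hk : k < ts.length),
        ts[k] = ((pvFlags A).getD (t + k) false, (pvFlags A).getD (t + k + 2 * b) false)) →
    ((PySem.List.enumerate ts ((t : Int) + 1)).foldl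
      (fun (st : Int × List Int) e =>
        (st.1 + ((if e.2.2 then 1 else 0) - (if e.2.1 then 1 else 0)),
         if st.1 + ((if e.2.2 then 1 else 0) - (if e.2.1 then 1 else 0)) = 0
           then st.2 ++ [e.1 + B] else st.2))
      (pvD A (2 * b + 1) t, res)).2
    = res ++ ((PySem.List.pyRange ((t : Int) + 1) ((A.length - (2 * b + 1) + 1 : Nat) : Int) 1).filter
        (fun s => pvNoAdj ((A.drop s.toNat).take (2 * b + 1)))).map (fun s => s + B)
  | [], t, res => by
      intro hlen2 _
      simp only [List.length_nil] at hlen2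
      rw [PySem.List.enumerate_nil, List.foldl_nil,
        PySem.List.pyRange_one_eq_nil (by push_cast; omega)]
      simp
  | (fo, fi) :: ts, t, res => by
      intro hlen2 helt
      have hfo : fo = (pvFlags A).getD t false := by
        have := helt 0 (by simp)
        simpa using congrArg Prod.fst this
      have hfi : fi = (pvFlags A).getD (t + 2 * b) false := by
        have := helt 0 (by simp)
        simpa using congrArg Prod.snd this
      have hwin : t + 1 + (2 * b + 1) ≤ A.length := by
        simp at hlen2; omega
      have hF1 : (pvFlags A).getD t false = (A.getD t 0 == A.getD (t + 1) 0) :=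
        pvFlags_getD A t (by omega)
      have hF2 : (pvFlags A).getD (t + 2 * b) false = (A.getD (t + 2 * b) 0 == A.getD (t + 2 * b + 1) 0) :=
        pvFlags_getD A (t + 2 * b) (by omega)
      have hstep : pvD A (2 * b + 1) t + ((if fi then 1 else 0) - (if fo then 1 else 0))
          = pvD A (2 * b + 1) (t + 1) := by
        rw [hfo, hfi, hF1, hF2, pvD_succ A b t hwin]
        by_cases h1 : A.getD (t + 2 * b) 0 = A.getD (t + 2 * b + 1) 0 <;>
          by_cases h2 : A.getD t 0 = A.getD (t + 1) 0 <;>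
            simp [h1, h2] <;> omega
      rw [PySem.List.enumerate_cons, List.foldl_cons]
      simp only [hstep]
      have ih := pvFoldB A B b hlen ts (t + 1)
        (if pvD A (2 * b + 1) (t + 1) = 0 then res ++ [(t : Int) + 1 + B] else res)
        (by simp at hlen2 ⊢; omega)
        (by
          intro k hk
          have := helt (k + 1) (by simp; omega)
          simpa [Nat.add_assoc, Nat.add_comm, Nat.add_left_comm] using this)
      push_cast at ih
      rw [(by push_cast; ring :
        ((A.length - (2 * b + 1) + 1 : Nat) : Int) = ((A.length - (2 * b + 1) : Nat) : Int) + 1)]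
      rw [ih]
      have hlt : (t : Int) + 1 < ((A.length - (2 * b + 1) : Nat) : Int) + 1 := by
        simp at hlen2; push_cast; omega
      rw [PySem.List.pyRange_one_cons hlt]
      rw [List.filter_cons]
      have htn : ((t : Int) + 1).toNat = t + 1 := by omega
      rw [htn]
      have hiff := pvNoAdj_iff_pvD A (2 * b + 1) (t + 1)
      by_cases hD : pvD A (2 * b + 1) (t + 1) = 0
      · have hT : pvNoAdj ((A.drop (t + 1)).take (2 * b + 1)) = true := hiff.2 hD
        rw [if_pos hD]
        simp only [hT, if_pos]
        rw [List.map_cons]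
        rw [List.append_assoc]
        rfl
      · have hT : pvNoAdj ((A.drop (t + 1)).take (2 * b + 1)) = false := by
          rcases hq : pvNoAdj ((A.drop (t + 1)).take (2 * b + 1)) with _ | _
          · rfl
          · exact absurd (hiff.1 hq) hD
        rw [if_neg hD]
        simp only [hT]
        rw [if_neg (by simp)]

-- ===== VERDICT (by name: the statement is the Claim_ definition above) =====
theorem AlternatingSubarraysEasyOptimised_spec : Claim_equal_AlternatingSubarraysEasyOptimised := by
  intro A B _hdom hB
  unfold Spec_AlternatingSubarraysEasyOptimised
  simp only [AlternatingSubarraysEasyOptimised, AlternatingSubarraysEasyOptimised_alt]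
  by_cases h1 : 2 * B + 1 = 1
  · simp [h1]
  · rw [if_neg h1, if_neg h1]
    by_cases hnL : (A.length : Int) < 2 * B + 1
    · -- no window fits (A.length < 2B+1): A's loop range is empty
      rw [if_pos hnL, PySem.List.pyRange_one_eq_nil (by omega)]
      rfl
    · rw [if_neg hnL]
      have hB1 : 1 ≤ B := by
        unfold Pre_AlternatingSubarraysEasyOptimised at hB; omega
      obtain ⟨b, hb⟩ : ∃ b : Nat, B = (b : Int) := ⟨B.toNat, (Int.toNat_of_nonneg hB).symm⟩
      rw [not_lt] at hnL
      have hlen : 2 * b + 1 ≤ A.length := by omega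
      -- A's loop is an append-if fold: turn it into filter+map
      rw [PySem.List.foldl_append_if
        (fun start =>
          ((PySem.List.pyRange 1 ((PySem.List.slice A (some start) (some (2 * B + 1 + start - 1 + 1))).length : Int) 1).foldl
            (fun (st : Bool × Int) i =>
              ((if st.2 = PySem.List.pyGetD (PySem.List.slice A (some start) (some (2 * B + 1 + start - 1 + 1))) i 0 then false else st.1),
               PySem.List.pyGetD (PySem.List.slice A (some start) (some (2 * B + 1 + start - 1 + 1))) i 0))
            (true, PySem.List.pyGetD (PySem.List.slice A (some start) (some (2 * B + 1 + start - 1 + 1))) 0 0)).1)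
        (fun start => PySem.Int.floordiv (start + (2 * B + 1 + start - 1)) 2)]
      rw [List.nil_append]
      have hmem : ∀ start ∈ PySem.List.pyRange 0 ((A.length : Int) - (2 * B + 1) + 1) 1,
          0 ≤ start ∧ start < (A.length : Int) - (2 * B + 1) + 1 := by
        intro start hst
        exact PySem.List.mem_pyRange_one.1 hst
      -- the flag loop of A tests exactly pvNoAdj of the window
      have hfil : ∀ start ∈ PySem.List.pyRange 0 ((A.length : Int) - (2 * B + 1) + 1) 1,
          ((PySem.List.pyRange 1 ((PySem.List.slice A (some start) (some (2 * B + 1 + start - 1 + 1))).length : Int) 1).foldl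
            (fun (st : Bool × Int) i =>
              ((if st.2 = PySem.List.pyGetD (PySem.List.slice A (some start) (some (2 * B + 1 + start - 1 + 1))) i 0 then false else st.1),
               PySem.List.pyGetD (PySem.List.slice A (some start) (some (2 * B + 1 + start - 1 + 1))) i 0))
            (true, PySem.List.pyGetD (PySem.List.slice A (some start) (some (2 * B + 1 + start - 1 + 1))) 0 0)).1
          = pvNoAdj ((A.drop start.toNat).take (2 * b + 1)) := by
        intro start hst
        obtain ⟨h0, hlt⟩ := hmem start hst
        obtain ⟨s, rfl⟩ : ∃ s : Nat, start = (s : Int) := ⟨start.toNat, (Int.toNat_of_nonneg h0).symm⟩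
        have hsl : s + (2 * b + 1) ≤ A.length := by omega
        have hsli : PySem.List.slice A (some (s : Int)) (some (2 * B + 1 + (s : Int) - 1 + 1))
            = (A.drop s).take (2 * b + 1) := by
          have : (2 * B + 1 + (s : Int) - 1 + 1) = (s : Int) + ((2 * b + 1 : Nat) : Int) := by
            push_cast; omega
          rw [this]
          exact PySem.List.slice_natCast_add A s (2 * b + 1)
        rw [hsli]
        set w : List Int := (A.drop s).take (2 * b + 1) with hw
        have hwlen : w.length = 2 * b + 1 := by
          rw [hw, List.length_take, List.length_drop]; omega
        obtain ⟨w0, ws, hwc⟩ : ∃ w0 ws, w = w0 :: ws := by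
          cases hwe : w with
          | nil => rw [hwe] at hwlen; simp at hwlen
          | cons a l => exact ⟨a, l, rfl⟩
        rw [PySem.List.foldl_pyRange_pyGetD' w 0
          (fun (st : Bool × Int) (cur : Int) => ((if st.2 = cur then false else st.1), cur))
          (true, PySem.List.pyGetD w 0 0) (by norm_num)]
        have ht : (1 : Int).toNat = 1 := rfl
        rw [ht, hwc, List.drop_succ_cons, List.drop_zero, PySem.List.pyGetD_zero_cons,
          pvFoldAlt ws true w0, Bool.true_and, ← hwc]
        rw [Int.toNat_natCast]
      rw [List.filter_congr hfil]
      have hmapeq : (List.filter (fun start => pvNoAdj ((A.drop start.toNat).take (2 * b + 1)))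
            (PySem.List.pyRange 0 ((A.length : Int) - (2 * B + 1) + 1) 1)).map
            (fun start => PySem.Int.floordiv (start + (2 * B + 1 + start - 1)) 2)
          = (List.filter (fun start => pvNoAdj ((A.drop start.toNat).take (2 * b + 1)))
            (PySem.List.pyRange 0 ((A.length : Int) - (2 * B + 1) + 1) 1)).map
            (fun start => start + B) := by
        apply List.map_congr_left
        intro start hst
        have hst' := (List.mem_filter.1 hst).1
        obtain ⟨h0, hlt⟩ := hmem start hst'
        rw [PySem.Int.floordiv_eq_ediv_of_pos (by norm_num)]
        omega
      rw [hmapeq]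
      -- B's side: flags, the initial window count and the sliding loop
      rw [PySem.List.slice_from_one]
      have hL1 : 2 * B + 1 - 1 = ((2 * b : Nat) : Int) := by omega
      rw [hL1, PySem.List.slice_to_natCast, PySem.List.slice_from_natCast]
      have hflags : (A.zip A.tail).map (fun p => p.1 == p.2) = pvFlags A := rfl
      rw [hflags]
      have hcnt : ((((pvFlags A).take (2 * b)).countP (fun f => f) : Nat) : Int)
          = pvD A (2 * b + 1) 0 := by
        rw [pvCount_take A (2 * b) (by omega)]
        have hw := pvWindowSplit A 0 (2 * b + 1) (by omega) (by omega)
        rw [Nat.zero_add, Nat.zero_add, pvCntAdj_take_one] at hw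
        have h21 : 2 * b + 0 + 1 = 2 * b + 1 := by omega
        omega
      rw [hcnt]
      have hfold := pvFoldB A B b hlen ((pvFlags A).zip ((pvFlags A).drop (2 * b))) 0
        (if pvD A (2 * b + 1) 0 = 0 then [B] else [])
        (by
          rw [List.length_zip, List.length_drop, pvFlags_length]
          omega)
        (by
          intro k hk
          rw [List.length_zip, List.length_drop, pvFlags_length] at hk
          have hk1 : k < (pvFlags A).length := by rw [pvFlags_length]; omega
          have hk2 : k < ((pvFlags A).drop (2 * b)).length := by
            rw [List.length_drop, pvFlags_length]; omega
          rw [List.getElem_zip]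
          rw [List.getElem_drop]
          rw [List.getD_eq_getElem _ _ (by rw [pvFlags_length]; omega : 0 + k < (pvFlags A).length),
              List.getD_eq_getElem _ _ (by rw [pvFlags_length]; omega : 0 + k + 2 * b < (pvFlags A).length)]
          simp [Nat.add_comm])
      simp only [Nat.cast_zero, zero_add] at hfold
      rw [hfold]
      -- peel the window at start 0 from the range
      have hbound : ((A.length : Int) - (2 * B + 1) + 1) = ((A.length - (2 * b + 1) + 1 : Nat) : Int) := by
        omega
      rw [hbound]
      rw [PySem.List.pyRange_one_cons (by push_cast; omega : (0 : Int) < ((A.length - (2 * b + 1) + 1 : Nat) : Int))]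
      rw [List.filter_cons]
      simp only [zero_add, Int.toNat_zero]
      have hiff := pvNoAdj_iff_pvD A (2 * b + 1) 0
      by_cases hD : pvD A (2 * b + 1) 0 = 0
      · have hT : pvNoAdj ((A.drop 0).take (2 * b + 1)) = true := hiff.2 hD
        rw [if_pos hD]
        simp only [hT, if_pos]
        rw [List.map_cons]
        simp
      · have hT : pvNoAdj ((A.drop 0).take (2 * b + 1)) = false := by
          rcases hq : pvNoAdj ((A.drop 0).take (2 * b + 1)) with _ | _
          · rfl
          · exact absurd (hiff.1 hq) hD
        rw [if_neg hD]
        simp only [hT]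
        rw [if_neg (by simp)]
        rfl
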